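-- pv_equiv track=rewrite | github.com/tr-igem/ekmelos | scripts/metadata.py | getClassItems
-- ===== SOURCE A (Python) =====
-- def getClassItems(c, o):
--     """Retrieve the glyphnames of class c in dict o recursively"""
--     l = []
--     for n in o[c]:
--         if n in o:
--             l += getClassItems(n, o)
--         else:
--             l.append(n)
--     return l
-- ===== SOURCE B (Python) =====
-- def getClassItems(c, o):
--     """Retrieve the glyphnames of class c in dict o recursively"""
--     result = []
--     stack = list(reversed(o[c]))
--     while stack:
--         n = stack.pop()
--         if n in o:
--             stack.extend(reversed(o[n]))
--         else:
--             result.append(n)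
--     return result
-- ===== Notes on version B (the rewrite author's own statement) =====
-- stated objective: alternative
-- what changed: Replaces A's recursion with an explicit worklist/stack loop (children pushed reversed so leaves keep A's left-to-right order), removing Python's recursion-depth limit from the mechanism.
import Mathlib
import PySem

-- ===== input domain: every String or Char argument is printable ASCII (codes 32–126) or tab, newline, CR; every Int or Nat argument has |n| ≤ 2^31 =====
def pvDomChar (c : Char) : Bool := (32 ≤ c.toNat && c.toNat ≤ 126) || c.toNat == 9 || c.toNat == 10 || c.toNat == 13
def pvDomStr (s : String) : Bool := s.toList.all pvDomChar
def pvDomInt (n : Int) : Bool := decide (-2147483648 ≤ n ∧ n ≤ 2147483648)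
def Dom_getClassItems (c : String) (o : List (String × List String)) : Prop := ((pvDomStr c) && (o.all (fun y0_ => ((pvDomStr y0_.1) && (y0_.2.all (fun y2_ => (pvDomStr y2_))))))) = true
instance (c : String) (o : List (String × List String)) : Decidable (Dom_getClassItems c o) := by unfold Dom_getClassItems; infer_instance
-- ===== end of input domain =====

-- B replaces A's recursion with an explicit worklist/stack loop (same values, same order); the Lean
-- fuel arguments are totality guards only and are proved irrelevant under Pre_.

-- dict lookup o[c] / 'c in o' on the association list (first match = the convention's dict lookup)
def pvLookup (c : String) : List (String × List String) → Option (List String)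
  | [] => none
  | p :: rest => if p.1 = c then some p.2 else pvLookup c rest

-- total number of listed glyphname occurrences (used as a fuel bound by both ports)
def pvSumLen (o : List (String × List String)) : Nat := (o.flatMap (fun p => p.2)).length

-- ===== PORT A =====
-- recursion of A, with a fuel totality guard (Pre_ guarantees the fuel is never exhausted)
def pvGoA (o : List (String × List String)) : Nat → String → List String
  | 0, _ => []
  | f + 1, c =>
    match pvLookup c o with
    | none => []          -- o[c] raises KeyError: excluded by Pre_
    | some ns => ns.foldl (fun l n => if (pvLookup n o).isSome then l ++ pvGoA o f n else l ++ [n]) []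

def getClassItems (c : String) (o : List (String × List String)) : List String :=
  pvGoA o (pvSumLen o + 1) c

-- ===== PORT B =====
-- B's while loop; the Lean list's HEAD is the Python stack's TOP (its end), so Python's
-- 'stack.extend(reversed(o[n]))' is prepending o[n] in order; fuel is a totality guard only.
def pvLoopB (o : List (String × List String)) : Nat → List String → List String → List String
  | 0, _, res => res
  | _ + 1, [], res => res
  | f + 1, n :: stack, res =>
    match pvLookup n o with
    | some ns => pvLoopB o f (ns ++ stack) res
    | none => pvLoopB o f stack (res ++ [n])

def getClassItems_alt (c : String) (o : List (String × List String)) : List String :=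
  match pvLookup c o with
  | none => []            -- o[c] raises KeyError: excluded by Pre_
  | some ns => pvLoopB o ((pvSumLen o + 2) ^ (pvSumLen o + 2)) ns []

-- ===== PRECONDITION & SPEC =====
-- the children of a glyphname: its class members if it is a key of o, nothing otherwise
def pvChildren (o : List (String × List String)) (k : String) : List String :=
  (pvLookup k o).getD []

-- one expansion step of the standard reachability closure on the class graph
def pvStep (o : List (String × List String)) (S : List String) : List String :=
  (S ++ S.flatMap (pvChildren o)).dedup

def pvIter (o : List (String × List String)) : Nat → List String → List String
  | 0, S => S
  | n + 1, S => pvIter o n (pvStep o S)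

-- all glyphnames reachable from c (pvSumLen o + 1 closure steps always saturate)
def pvReach (o : List (String × List String)) (c : String) : List String :=
  pvIter o (pvSumLen o + 1) [c]

-- all strict descendants of k
def pvDesc (o : List (String × List String)) (k : String) : List String :=
  pvIter o (pvSumLen o + 1) (pvChildren o k)

-- Pre_ excludes exactly the inputs on which A raises: c not a key of o (KeyError) and a class
-- cycle reachable from c (RecursionError).  Acyclicity is a property of the class GRAPH, so it is
-- stated through the standard reachable-set closure of that graph (pvIter saturates: one step per
-- possible new member); it is a membership condition on the input's edge relation, not a replay of
-- either port's traversal.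
def Pre_getClassItems (c : String) (o : List (String × List String)) : Prop :=
  (pvLookup c o).isSome ∧ ∀ k ∈ pvReach o c, k ∉ pvDesc o k
instance (c : String) (o : List (String × List String)) : Decidable (Pre_getClassItems c o) := by
  unfold Pre_getClassItems; infer_instance

def pvWitness_getClassItems : String × (List (String × List String)) :=
  ("a", [("a", ["x", "b"]), ("b", ["y"])])

def Spec_getClassItems (c : String) (o : List (String × List String)) (out : List String) : Prop := out = getClassItems_alt c o
instance (c : String) (o : List (String × List String)) (out : List String) : Decidable (Spec_getClassItems c o out) := by unfold Spec_getClassItems; infer_instance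

-- ===== CLAIM (what is proved, stated in full; the proofs are below) =====
def Claim_equal_getClassItems : Prop := ∀ (c : String) (o : List (String × List String)), Dom_getClassItems c o → Pre_getClassItems c o → Spec_getClassItems c o (getClassItems c o)

-- ===== LEMMAS AND PROOFS =====

lemma mem_pvStep {o : List (String × List String)} {S : List String} {x : String} :
    x ∈ pvStep o S ↔ x ∈ S ∨ ∃ k ∈ S, x ∈ pvChildren o k := by
  simp [pvStep]

lemma sub_pvStep {o : List (String × List String)} {S : List String} : S ⊆ pvStep o S :=
  fun _ hx => mem_pvStep.mpr (Or.inl hx)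

lemma sub_pvIter {o : List (String × List String)} : ∀ (n : Nat) (S : List String), S ⊆ pvIter o n S := by
  intro n
  induction n with
  | zero => intro S; exact fun _ h => h
  | succ n ih => intro S; exact fun x hx => ih (pvStep o S) (sub_pvStep hx)

-- closure of a member set under the class graph's edges
def pvClosed (o : List (String × List String)) (T : List String) : Prop :=
  ∀ k ∈ T, pvChildren o k ⊆ T

lemma pvStep_closed_sub {o : List (String × List String)} {S T : List String}
    (hT : pvClosed o T) (h : S ⊆ T) : pvStep o S ⊆ T := by
  intro x hx
  rcases mem_pvStep.mp hx with hx | ⟨k, hk, hxk⟩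
  · exact h hx
  · exact hT k (h hk) hxk

lemma pvIter_closed_sub {o : List (String × List String)} {T : List String}
    (hT : pvClosed o T) : ∀ (n : Nat) (S : List String), S ⊆ T → pvIter o n S ⊆ T := by
  intro n
  induction n with
  | zero => intro S h; exact h
  | succ n ih => intro S h; exact ih (pvStep o S) (pvStep_closed_sub hT h)

lemma pvLookup_sub {o : List (String × List String)} {k : String} {ns : List String}
    (h : pvLookup k o = some ns) : ns ⊆ o.flatMap (fun p => p.2) := by
  induction o with
  | nil => simp [pvLookup] at h
  | cons p rest ih =>
    by_cases hp : p.1 = k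
    · simp [pvLookup, hp] at h
      subst h; intro x hx; simp [List.mem_flatMap]; exact Or.inl hx
    · simp [pvLookup, hp] at h
      intro x hx
      have := ih h hx
      simp [List.mem_flatMap] at this ⊢
      exact Or.inr this

lemma pvChildren_sub_allC {o : List (String × List String)} (k : String) :
    pvChildren o k ⊆ o.flatMap (fun p => p.2) := by
  unfold pvChildren
  cases h : pvLookup k o with
  | none => simp
  | some ns => simpa using pvLookup_sub h

lemma allC_closed {o : List (String × List String)} {S : List String} :
    pvClosed o (S ++ o.flatMap (fun p => p.2)) := by
  intro k _ x hx
  exact List.mem_append_right _ (pvChildren_sub_allC k hx)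

lemma closed_congr {o : List (String × List String)} {S T : List String}
    (hS : pvClosed o S) (hTS : T ⊆ S) (hST : S ⊆ T) : pvClosed o T :=
  fun k hk => (hS k (hTS hk)).trans hST

lemma sat_aux {o : List (String × List String)} :
    ∀ (n : Nat) (S : List String),
      pvClosed o (pvIter o n S) ∨ S.toFinset.card + n ≤ (pvIter o n S).toFinset.card := by
  intro n
  induction n with
  | zero => intro S; right; simp [pvIter]
  | succ n ih =>
    intro S
    by_cases hS : pvClosed o S
    · left
      have h1 : pvIter o (n + 1) S ⊆ S := by
        show pvIter o n (pvStep o S) ⊆ S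
        exact pvIter_closed_sub hS n _ (pvStep_closed_sub hS (fun _ h => h))
      have h2 : S ⊆ pvIter o (n + 1) S := by
        show S ⊆ pvIter o n (pvStep o S)
        exact fun x hx => sub_pvIter n _ (sub_pvStep hx)
      exact closed_congr hS h1 h2
    · rcases ih (pvStep o S) with h | h
      · exact Or.inl h
      · right
        obtain ⟨k, hk, m, hm, hmS⟩ : ∃ k ∈ S, ∃ m ∈ pvChildren o k, m ∉ S := by
          by_contra hcon
          apply hS
          intro k hk x hx
          by_contra hxS
          exact hcon ⟨k, hk, x, hx, hxS⟩
        have hsub : S.toFinset ⊂ (pvStep o S).toFinset := by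
          constructor
          · intro x hx
            simp only [List.mem_toFinset] at hx ⊢
            exact sub_pvStep hx
          · intro hcon
            have : m ∈ S.toFinset := hcon (by
              simp only [List.mem_toFinset]
              exact mem_pvStep.mpr (Or.inr ⟨k, hk, hm⟩))
            simp only [List.mem_toFinset] at this
            exact hmS this
        have hcard : S.toFinset.card + 1 ≤ (pvStep o S).toFinset.card :=
          Finset.card_lt_card hsub
        show S.toFinset.card + (n + 1) ≤ (pvIter o n (pvStep o S)).toFinset.card
        omega

lemma pvIter_card_le {o : List (String × List String)} (n : Nat) (S : List String) :
    (pvIter o n S).toFinset.card ≤ S.toFinset.card + pvSumLen o := by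
  have hsub : pvIter o n S ⊆ S ++ o.flatMap (fun p => p.2) :=
    pvIter_closed_sub allC_closed n S (List.subset_append_left _ _)
  have h1 : (pvIter o n S).toFinset ⊆ (S ++ o.flatMap (fun p => p.2)).toFinset := by
    intro x hx
    simp only [List.mem_toFinset] at hx ⊢
    exact hsub hx
  calc (pvIter o n S).toFinset.card
      ≤ (S ++ o.flatMap (fun p => p.2)).toFinset.card := Finset.card_le_card h1
    _ = (S.toFinset ∪ (o.flatMap (fun p => p.2)).toFinset).card := by simp
    _ ≤ S.toFinset.card + (o.flatMap (fun p => p.2)).toFinset.card := Finset.card_union_le _ _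
    _ ≤ S.toFinset.card + pvSumLen o := by
        have := (o.flatMap (fun p => p.2)).toFinset_card_le
        unfold pvSumLen; omega

lemma pvIter_closed {o : List (String × List String)} (S : List String) :
    pvClosed o (pvIter o (pvSumLen o + 1) S) := by
  rcases sat_aux (pvSumLen o + 1) S with h | h
  · exact h
  · exfalso
    have := pvIter_card_le (o := o) (pvSumLen o + 1) S
    omega

lemma reach_closed {o : List (String × List String)} (c : String) : pvClosed o (pvReach o c) :=
  pvIter_closed _

lemma mem_reach_self {o : List (String × List String)} (c : String) : c ∈ pvReach o c :=
  sub_pvIter _ _ (by simp)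

lemma reach_children {o : List (String × List String)} {c k m : String}
    (hk : k ∈ pvReach o c) (hm : m ∈ pvChildren o k) : m ∈ pvReach o c :=
  reach_closed c k hk hm

lemma children_sub_desc {o : List (String × List String)} (k : String) :
    pvChildren o k ⊆ pvDesc o k :=
  sub_pvIter _ _

lemma desc_closed {o : List (String × List String)} (k : String) : pvClosed o (pvDesc o k) :=
  pvIter_closed _

lemma desc_sub {o : List (String × List String)} {k m : String} (hm : m ∈ pvChildren o k) :
    pvDesc o m ⊆ pvDesc o k :=
  pvIter_closed_sub (desc_closed k) _ _ (desc_closed k m (children_sub_desc k hm))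

-- rank of a glyphname: number of distinct strict descendants (proof-only measure)
def pvRank (o : List (String × List String)) (k : String) : Nat := (pvDesc o k).toFinset.card

lemma rank_lt {o : List (String × List String)} {c k m : String}
    (hacyc : ∀ x ∈ pvReach o c, x ∉ pvDesc o x)
    (hk : k ∈ pvReach o c) (hm : m ∈ pvChildren o k) : pvRank o m < pvRank o k := by
  have hmr : m ∈ pvReach o c := reach_children hk hm
  refine Finset.card_lt_card ⟨?_, ?_⟩
  · intro x hx
    simp only [List.mem_toFinset] at hx ⊢
    exact desc_sub hm hx
  · intro hcon
    have : m ∈ (pvDesc o m).toFinset := hcon (by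
      simp only [List.mem_toFinset]
      exact children_sub_desc k hm)
    simp only [List.mem_toFinset] at this
    exact hacyc m hmr this

lemma pvRank_le {o : List (String × List String)} (k : String) : pvRank o k ≤ pvSumLen o := by
  have hsub : pvDesc o k ⊆ o.flatMap (fun p => p.2) := by
    refine pvIter_closed_sub ?_ _ _ (pvChildren_sub_allC k)
    intro x _ y hy
    exact pvChildren_sub_allC x hy
  have h1 : (pvDesc o k).toFinset ⊆ (o.flatMap (fun p => p.2)).toFinset := by
    intro x hx
    simp only [List.mem_toFinset] at hx ⊢
    exact hsub hx
  calc pvRank o k ≤ (o.flatMap (fun p => p.2)).toFinset.card := Finset.card_le_card h1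
    _ ≤ pvSumLen o := by
        have := (o.flatMap (fun p => p.2)).toFinset_card_le
        unfold pvSumLen; omega

lemma pvChildren_eq {o : List (String × List String)} {k : String} {ns : List String}
    (h : pvLookup k o = some ns) : pvChildren o k = ns := by
  simp [pvChildren, h]

lemma pvLookup_len_le {o : List (String × List String)} {k : String} {ns : List String}
    (h : pvLookup k o = some ns) : ns.length ≤ pvSumLen o := by
  induction o with
  | nil => simp [pvLookup] at h
  | cons p rest ih =>
    by_cases hp : p.1 = k
    · simp [pvLookup, hp] at h
      subst h; simp [pvSumLen]
    · simp [pvLookup, hp] at h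
      have := ih h
      simp only [pvSumLen, List.flatMap_cons, List.length_append] at *
      omega

-- A's recursion returns the same list for any sufficient fuel
lemma goA_fuel {o : List (String × List String)} {c : String}
    (hacyc : ∀ x ∈ pvReach o c, x ∉ pvDesc o x) :
    ∀ K k f g, k ∈ pvReach o c → pvRank o k < K →
      pvRank o k + 1 ≤ f → pvRank o k + 1 ≤ g → pvGoA o f k = pvGoA o g k := by
  intro K
  induction K with
  | zero => intro k f g _ hK _ _; omega
  | succ K ih =>
    intro k f g hk hK hf hg
    obtain ⟨f', rfl⟩ : ∃ f', f = f' + 1 := ⟨f - 1, by omega⟩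
    obtain ⟨g', rfl⟩ : ∃ g', g = g' + 1 := ⟨g - 1, by omega⟩
    cases hlk : pvLookup k o with
    | none => simp [pvGoA, hlk]
    | some ns =>
      simp only [pvGoA, hlk]
      refine PySem.List.foldl_congr_mem _ _ _ _ (fun acc m hm => ?_)
      have hmc : m ∈ pvChildren o k := (pvChildren_eq hlk) ▸ hm
      by_cases hms : (pvLookup m o).isSome
      · have hlt := rank_lt hacyc hk hmc
        have hrec : pvGoA o f' m = pvGoA o g' m := by
          refine ih m f' g' (reach_children hk hmc) ?_ ?_ ?_ <;> omega
        simp [hms, hrec]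
      · simp [hms]

-- the canonical expansion of one glyphname (A's value at a key, itself for a leaf)
def pvSem (o : List (String × List String)) (m : String) : List String :=
  if (pvLookup m o).isSome then pvGoA o (pvSumLen o + 1) m else [m]

lemma goA_eq_flatMap {o : List (String × List String)} {c k : String} {ns : List String} {f : Nat}
    (hacyc : ∀ x ∈ pvReach o c, x ∉ pvDesc o x)
    (hk : k ∈ pvReach o c) (hns : pvLookup k o = some ns) (hf : pvRank o k + 1 ≤ f) :
    pvGoA o f k = ns.flatMap (pvSem o) := by
  obtain ⟨f', rfl⟩ : ∃ f', f = f' + 1 := ⟨f - 1, by omega⟩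
  simp only [pvGoA, hns]
  have hstep : ∀ (acc : List String) (m : String), m ∈ ns →
      (if (pvLookup m o).isSome then acc ++ pvGoA o f' m else acc ++ [m]) = acc ++ pvSem o m := by
    intro acc m hm
    have hmc : m ∈ pvChildren o k := (pvChildren_eq hns) ▸ hm
    by_cases hms : (pvLookup m o).isSome
    · have hlt := rank_lt hacyc hk hmc
      have hle := pvRank_le (o := o) m
      have : pvGoA o f' m = pvGoA o (pvSumLen o + 1) m := by
        refine goA_fuel hacyc (pvRank o m + 1) m f' (pvSumLen o + 1)
          (reach_children hk hmc) ?_ ?_ ?_ <;> omega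
      simp [pvSem, hms, this]
    · simp [pvSem, hms]
  calc ns.foldl (fun l n => if (pvLookup n o).isSome then l ++ pvGoA o f' n else l ++ [n]) []
      = ns.foldl (fun l n => l ++ pvSem o n) [] := PySem.List.foldl_congr_mem _ _ _ _ hstep
    _ = [] ++ ns.flatMap (pvSem o) := PySem.List.foldl_append_eq_flatMap _ _ _
    _ = ns.flatMap (pvSem o) := by simp

-- termination weights for B's loop
def pvW (o : List (String × List String)) (n : String) : Nat :=
  if (pvLookup n o).isSome then (pvSumLen o + 2) ^ (pvRank o n + 1) else 1

def pvMu (o : List (String × List String)) (stack : List String) : Nat :=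
  (stack.map (pvW o)).sum

lemma pvW_pos (o : List (String × List String)) (m : String) : 1 ≤ pvW o m := by
  unfold pvW
  split
  · exact Nat.one_le_pow _ _ (by omega)
  · exact le_refl 1

lemma mu_children {o : List (String × List String)} {c n : String} {ns : List String}
    (hacyc : ∀ x ∈ pvReach o c, x ∉ pvDesc o x)
    (hn : n ∈ pvReach o c) (hns : pvLookup n o = some ns) :
    pvMu o ns + 1 ≤ pvW o n := by
  set B := pvSumLen o + 2 with hB
  have hW : ∀ m ∈ ns, pvW o m ≤ B ^ pvRank o n := by
    intro m hm
    have hmc : m ∈ pvChildren o n := (pvChildren_eq hns) ▸ hm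
    unfold pvW
    split
    · have := rank_lt hacyc hn hmc
      exact Nat.pow_le_pow_right (by omega) (by omega)
    · exact Nat.one_le_pow _ _ (by omega)
  have hsum : pvMu o ns ≤ ns.length * B ^ pvRank o n := by
    unfold pvMu
    calc (ns.map (pvW o)).sum
        ≤ (ns.map (fun _ => B ^ pvRank o n)).sum := List.sum_le_sum (by simpa using hW)
      _ = ns.length * B ^ pvRank o n := by simp [List.map_const']
  have hlen : ns.length ≤ pvSumLen o := pvLookup_len_le hns
  have hsome : (pvLookup n o).isSome := by simp [hns]
  have hWn : pvW o n = B * B ^ pvRank o n := by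
    rw [pvW, if_pos hsome, ← hB, pow_succ, Nat.mul_comm]
  have hp1 : 1 ≤ B ^ pvRank o n := Nat.one_le_pow _ _ (by omega)
  have : ns.length * B ^ pvRank o n ≤ pvSumLen o * B ^ pvRank o n :=
    Nat.mul_le_mul_right _ hlen
  rw [hWn]
  have hBmul : B * B ^ pvRank o n = pvSumLen o * B ^ pvRank o n + 2 * B ^ pvRank o n := by ring
  omega

lemma loopB_eq {o : List (String × List String)} {c : String}
    (hacyc : ∀ x ∈ pvReach o c, x ∉ pvDesc o x) :
    ∀ f (stack res : List String), (∀ n ∈ stack, n ∈ pvReach o c) → pvMu o stack ≤ f →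
      pvLoopB o f stack res = res ++ stack.flatMap (pvSem o) := by
  intro f
  induction f with
  | zero =>
    intro stack res hst hmu
    cases stack with
    | nil => simp [pvLoopB]
    | cons n rest =>
      exfalso
      have := pvW_pos o n
      simp [pvMu] at hmu
      omega
  | succ f ih =>
    intro stack res hst hmu
    cases stack with
    | nil => simp [pvLoopB]
    | cons n rest =>
      have hnr : n ∈ pvReach o c := hst n (by simp)
      have hrest : ∀ m ∈ rest, m ∈ pvReach o c := fun m hm => hst m (by simp [hm])
      cases hln : pvLookup n o with
      | some ns =>
        have hnsr : ∀ m ∈ ns, m ∈ pvReach o c := by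
          intro m hm
          exact reach_children hnr (by rw [pvChildren_eq hln]; exact hm)
        have hmub := mu_children hacyc hnr hln
        have hmu' : pvMu o (ns ++ rest) ≤ f := by
          have h1 : pvMu o (ns ++ rest) = pvMu o ns + pvMu o rest := by simp [pvMu]
          have h2 : pvMu o (n :: rest) = pvW o n + pvMu o rest := by simp [pvMu]
          omega
        simp only [pvLoopB, hln]
        rw [ih (ns ++ rest) res (by
          intro m hm
          rcases List.mem_append.mp hm with hm | hm
          · exact hnsr m hm
          · exact hrest m hm) hmu']
        have hsome : (pvLookup n o).isSome := by simp [hln]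
        have hsem : pvSem o n = ns.flatMap (pvSem o) := by
          rw [pvSem, if_pos hsome]
          exact goA_eq_flatMap hacyc hnr hln (by have := pvRank_le (o := o) n; omega)
        simp [hsem, List.flatMap_append]
      | none =>
        have hw1 : pvW o n = 1 := by simp [pvW, hln]
        have hsemn : pvSem o n = [n] := by simp [pvSem, hln]
        have hmu' : pvMu o rest ≤ f := by
          have : pvMu o (n :: rest) = pvW o n + pvMu o rest := by simp [pvMu]
          omega
        simp only [pvLoopB, hln]
        rw [ih rest (res ++ [n]) hrest hmu']
        simp [hsemn]

-- ===== VERDICT (by name: the statement is the Claim_ definition above) =====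
theorem getClassItems_spec : Claim_equal_getClassItems := by
  intro c o _ hpre
  obtain ⟨hc, hacyc⟩ := hpre
  obtain ⟨ns, hlook⟩ := Option.isSome_iff_exists.mp hc
  unfold Spec_getClassItems getClassItems
  have hcr : c ∈ pvReach o c := mem_reach_self c
  have hA : pvGoA o (pvSumLen o + 1) c = ns.flatMap (pvSem o) :=
    goA_eq_flatMap hacyc hcr hlook (by have := pvRank_le (o := o) c; omega)
  have halt : getClassItems_alt c o =
      pvLoopB o ((pvSumLen o + 2) ^ (pvSumLen o + 2)) ns [] := by
    simp [getClassItems_alt, hlook]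
  rw [hA, halt]
  set B := pvSumLen o + 2 with hB
  have hW : ∀ m ∈ ns, pvW o m ≤ B ^ (pvSumLen o + 1) := by
    intro m _
    unfold pvW
    split
    · exact Nat.pow_le_pow_right (by omega) (by have := pvRank_le (o := o) m; omega)
    · exact Nat.one_le_pow _ _ (by omega)
  have hmu : pvMu o ns ≤ B ^ (pvSumLen o + 2) := by
    have hsum : pvMu o ns ≤ ns.length * B ^ (pvSumLen o + 1) := by
      unfold pvMu
      calc (ns.map (pvW o)).sum
          ≤ (ns.map (fun _ => B ^ (pvSumLen o + 1))).sum := List.sum_le_sum (by simpa using hW)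
        _ = ns.length * B ^ (pvSumLen o + 1) := by simp [List.map_const']
    have hlen : ns.length ≤ pvSumLen o := pvLookup_len_le hlook
    have hpow : B ^ (pvSumLen o + 2) = B * B ^ (pvSumLen o + 1) := by
      rw [pow_succ, Nat.mul_comm]
    have : ns.length * B ^ (pvSumLen o + 1) ≤ pvSumLen o * B ^ (pvSumLen o + 1) :=
      Nat.mul_le_mul_right _ hlen
    have hp1 : 1 ≤ B ^ (pvSumLen o + 1) := Nat.one_le_pow _ _ (by omega)
    nlinarith
  rw [loopB_eq hacyc _ ns []
    (by intro m hm; exact reach_children hcr (by rw [pvChildren_eq hlook]; exact hm)) hmu]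
  simp
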